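-- pv_equiv track=rewrite | github.com/k0rd/bakerrrr | game/semantic_catalog.py | category_order_for_color
-- ===== SOURCE A (Python) =====
-- RUNTIME_CATEGORIES = (
--     "terrain",
--     "features",
--     "infrastructure",
--     "properties",
--     "vehicles",
--     "items",
--     "projectiles",
--     "entities",
--     "ui_markers",
-- )
--
-- def category_order_for_color(color_key):
--     key = str(color_key or "default").strip().lower() or "default"
--     default_order = list(RUNTIME_CATEGORIES)
--
--     if key in {
--         "player",
--         "human",
--         "guard",
--         "scout",
--         "feline",
--         "canine",
--         "avian",
--         "insect",
--         "rodent",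
--         "reptile",
--         "amphibian",
--         "fish",
--         "ungulate",
--         "other",
--     } or key.startswith("cat_"):
--         return ["entities"] + [name for name in default_order if name != "entities"]
--     if key.startswith("item_"):
--         return ["items"] + [name for name in default_order if name != "items"]
--     if key.startswith("vehicle_"):
--         return ["vehicles"] + [name for name in default_order if name != "vehicles"]
--     if key.startswith("feature_"):
--         return ["features"] + [name for name in default_order if name != "features"]
--     if key.startswith("terrain_") or key.startswith("floor_") or key in {"building_edge", "building_fill"}:
--         return ["terrain"] + [name for name in default_order if name != "terrain"]
--     if key.startswith("property_") or key.startswith("building_roof_"):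
--         return ["properties"] + [name for name in default_order if name != "properties"]
--     if key == "projectile":
--         return ["projectiles"] + [name for name in default_order if name != "projectiles"]
--     if key.startswith("ui_"):
--         return ["ui_markers"] + [name for name in default_order if name != "ui_markers"]
--     if key == "transit":
--         return ["features", "terrain"] + [name for name in default_order if name not in {"features", "terrain"}]
--     return default_order
-- ===== SOURCE B (Python) =====
-- RUNTIME_CATEGORIES = (
--     "terrain",
--     "features",
--     "infrastructure",
--     "properties",
--     "vehicles",
--     "items",
--     "projectiles",
--     "entities",
--     "ui_markers",
-- )
--
-- _ENTITY_KEYS = frozenset({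
--     "player", "human", "guard", "scout", "feline", "canine", "avian",
--     "insect", "rodent", "reptile", "amphibian", "fish", "ungulate", "other",
-- })
--
-- # Ordered first-match rules: predicate -> categories to promote to the front.
-- _RULES = (
--     (lambda k: k in _ENTITY_KEYS or k.startswith("cat_"), ("entities",)),
--     (lambda k: k.startswith("item_"), ("items",)),
--     (lambda k: k.startswith("vehicle_"), ("vehicles",)),
--     (lambda k: k.startswith("feature_"), ("features",)),
--     (lambda k: k.startswith("terrain_") or k.startswith("floor_")
--         or k in ("building_edge", "building_fill"), ("terrain",)),
--     (lambda k: k.startswith("property_") or k.startswith("building_roof_"), ("properties",)),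
--     (lambda k: k == "projectile", ("projectiles",)),
--     (lambda k: k.startswith("ui_"), ("ui_markers",)),
--     (lambda k: k == "transit", ("features", "terrain")),
-- )
--
--
-- def category_order_for_color(color_key):
--     key = str(color_key or "default").strip().lower() or "default"
--     front = next((f for p, f in _RULES if p(key)), ())
--     return sorted(RUNTIME_CATEGORIES,
--                   key=lambda c: front.index(c) if c in front else len(front))
-- ===== Notes on version B (the rewrite author's own statement) =====
-- stated objective: alternative
-- what changed: Replaces the ten hand-written branch returns (each concatenating a literal front with a filtered copy of the category tuple) by a single ordered rules table scanned for the first matching predicate, and builds the result with one stable sort of RUNTIME_CATEGORIES keyed by position-in-front (len(front) for the rest) instead of list concatenation plus comprehensions.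
import Mathlib
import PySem

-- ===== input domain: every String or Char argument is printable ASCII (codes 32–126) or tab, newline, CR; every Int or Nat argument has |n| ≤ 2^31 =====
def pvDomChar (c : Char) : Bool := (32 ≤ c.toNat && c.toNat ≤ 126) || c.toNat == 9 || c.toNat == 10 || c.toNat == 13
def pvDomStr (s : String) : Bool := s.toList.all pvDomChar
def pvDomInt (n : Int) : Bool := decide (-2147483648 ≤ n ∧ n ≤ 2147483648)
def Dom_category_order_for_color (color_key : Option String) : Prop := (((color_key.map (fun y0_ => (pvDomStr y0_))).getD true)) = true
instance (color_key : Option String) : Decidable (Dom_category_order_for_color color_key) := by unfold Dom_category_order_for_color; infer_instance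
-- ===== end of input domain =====

-- B replaces the branch cascade by a first-match rules table plus one stable sort keyed by
-- position in the promoted front (objective: alternative decomposition, same cost).

-- key = str(color_key or "default").strip().lower() or "default"   (identical line in A and B)
def pvNormKey (color_key : Option String) : String :=
  let base : String := match color_key with
    | none => "default"
    | some s => if s == "" then "default" else s
  let k := PySem.Str.lower (PySem.Str.strip base)
  if k == "" then "default" else k

def RUNTIME_CATEGORIES : List String :=
  ["terrain", "features", "infrastructure", "properties", "vehicles",
   "items", "projectiles", "entities", "ui_markers"]

def pvEntityKeys : List String :=
  ["player", "human", "guard", "scout", "feline", "canine", "avian",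
   "insect", "rodent", "reptile", "amphibian", "fish", "ungulate", "other"]

-- ===== PORT A =====
def category_order_for_color (color_key : Option String) : List String :=
  let key := pvNormKey color_key
  let default_order := RUNTIME_CATEGORIES
  if pvEntityKeys.contains key || PySem.Str.startswith key "cat_" then
    ["entities"] ++ default_order.filter (fun name => name != "entities")
  else if PySem.Str.startswith key "item_" then
    ["items"] ++ default_order.filter (fun name => name != "items")
  else if PySem.Str.startswith key "vehicle_" then
    ["vehicles"] ++ default_order.filter (fun name => name != "vehicles")
  else if PySem.Str.startswith key "feature_" then
    ["features"] ++ default_order.filter (fun name => name != "features")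
  else if PySem.Str.startswith key "terrain_" || PySem.Str.startswith key "floor_"
      || (["building_edge", "building_fill"].contains key) then
    ["terrain"] ++ default_order.filter (fun name => name != "terrain")
  else if PySem.Str.startswith key "property_" || PySem.Str.startswith key "building_roof_" then
    ["properties"] ++ default_order.filter (fun name => name != "properties")
  else if key == "projectile" then
    ["projectiles"] ++ default_order.filter (fun name => name != "projectiles")
  else if PySem.Str.startswith key "ui_" then
    ["ui_markers"] ++ default_order.filter (fun name => name != "ui_markers")
  else if key == "transit" then
    ["features", "terrain"] ++ default_order.filter (fun name => !(["features", "terrain"].contains name))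
  else default_order

-- ===== PORT B =====
def pvRules : List ((String → Bool) × List String) :=
  [ (fun k => pvEntityKeys.contains k || PySem.Str.startswith k "cat_", ["entities"]),
    (fun k => PySem.Str.startswith k "item_", ["items"]),
    (fun k => PySem.Str.startswith k "vehicle_", ["vehicles"]),
    (fun k => PySem.Str.startswith k "feature_", ["features"]),
    (fun k => PySem.Str.startswith k "terrain_" || PySem.Str.startswith k "floor_"
      || (["building_edge", "building_fill"].contains k), ["terrain"]),
    (fun k => PySem.Str.startswith k "property_" || PySem.Str.startswith k "building_roof_", ["properties"]),
    (fun k => k == "projectile", ["projectiles"]),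
    (fun k => PySem.Str.startswith k "ui_", ["ui_markers"]),
    (fun k => k == "transit", ["features", "terrain"]) ]

-- next((f for p, f in _RULES if p(key)), ())
def pvFirstFront : List ((String → Bool) × List String) → String → List String
  | [], _ => []
  | (p, f) :: rest, k => if p k then f else pvFirstFront rest k

def category_order_for_color_alt (color_key : Option String) : List String :=
  let key := pvNormKey color_key
  let front := pvFirstFront pvRules key
  PySem.List.sorted RUNTIME_CATEGORIES
    (fun c => if front.contains c then (PySem.List.index? front c).getD 0 else front.length) false

-- ===== PRECONDITION & SPEC =====
def Spec_category_order_for_color (color_key : Option String) (out : List String) : Prop := out = category_order_for_color_alt color_key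
instance (color_key : Option String) (out : List String) : Decidable (Spec_category_order_for_color color_key out) := by unfold Spec_category_order_for_color; infer_instance

-- ===== CLAIM (what is proved, stated in full; the proofs are below) =====
def Claim_equal_category_order_for_color : Prop := ∀ (color_key : Option String), Dom_category_order_for_color color_key → Spec_category_order_for_color color_key (category_order_for_color color_key)

-- ===== LEMMAS AND PROOFS =====

-- B's sort expression with the promoted front abstracted (proof-side helper; defeq to B's body).
def pvSortB (front : List String) : List String :=
  PySem.List.sorted RUNTIME_CATEGORIES
    (fun c => if front.contains c then (PySem.List.index? front c).getD 0 else front.length) false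

-- Core equality for an arbitrary normalized key: both sides test the same predicates in the
-- same order; in each branch the promoted front is a closed list and the goal is decidable.
theorem pv_core (k : String) :
    (if pvEntityKeys.contains k || PySem.Str.startswith k "cat_" then
       ["entities"] ++ RUNTIME_CATEGORIES.filter (fun name => name != "entities")
     else if PySem.Str.startswith k "item_" then
       ["items"] ++ RUNTIME_CATEGORIES.filter (fun name => name != "items")
     else if PySem.Str.startswith k "vehicle_" then
       ["vehicles"] ++ RUNTIME_CATEGORIES.filter (fun name => name != "vehicles")
     else if PySem.Str.startswith k "feature_" then
       ["features"] ++ RUNTIME_CATEGORIES.filter (fun name => name != "features")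
     else if PySem.Str.startswith k "terrain_" || PySem.Str.startswith k "floor_"
         || (["building_edge", "building_fill"].contains k) then
       ["terrain"] ++ RUNTIME_CATEGORIES.filter (fun name => name != "terrain")
     else if PySem.Str.startswith k "property_" || PySem.Str.startswith k "building_roof_" then
       ["properties"] ++ RUNTIME_CATEGORIES.filter (fun name => name != "properties")
     else if k == "projectile" then
       ["projectiles"] ++ RUNTIME_CATEGORIES.filter (fun name => name != "projectiles")
     else if PySem.Str.startswith k "ui_" then
       ["ui_markers"] ++ RUNTIME_CATEGORIES.filter (fun name => name != "ui_markers")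
     else if k == "transit" then
       ["features", "terrain"] ++ RUNTIME_CATEGORIES.filter (fun name => !(["features", "terrain"].contains name))
     else RUNTIME_CATEGORIES) = pvSortB (pvFirstFront pvRules k) := by
  unfold pvSortB
  by_cases h1 : (pvEntityKeys.contains k || PySem.Str.startswith k "cat_") = true
  · have hf : pvFirstFront pvRules k = ["entities"] := by
      simp only [pvRules, pvFirstFront]
      rw [if_pos h1]
    rw [hf, if_pos h1]
    decide
  by_cases h2 : (PySem.Str.startswith k "item_") = true
  · have hf : pvFirstFront pvRules k = ["items"] := by
      simp only [pvRules, pvFirstFront]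
      rw [if_neg h1, if_pos h2]
    rw [hf, if_neg h1, if_pos h2]
    decide
  by_cases h3 : (PySem.Str.startswith k "vehicle_") = true
  · have hf : pvFirstFront pvRules k = ["vehicles"] := by
      simp only [pvRules, pvFirstFront]
      rw [if_neg h1, if_neg h2, if_pos h3]
    rw [hf, if_neg h1, if_neg h2, if_pos h3]
    decide
  by_cases h4 : (PySem.Str.startswith k "feature_") = true
  · have hf : pvFirstFront pvRules k = ["features"] := by
      simp only [pvRules, pvFirstFront]
      rw [if_neg h1, if_neg h2, if_neg h3, if_pos h4]
    rw [hf, if_neg h1, if_neg h2, if_neg h3, if_pos h4]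
    decide
  by_cases h5 : (PySem.Str.startswith k "terrain_" || PySem.Str.startswith k "floor_" || (["building_edge", "building_fill"].contains k)) = true
  · have hf : pvFirstFront pvRules k = ["terrain"] := by
      simp only [pvRules, pvFirstFront]
      rw [if_neg h1, if_neg h2, if_neg h3, if_neg h4, if_pos h5]
    rw [hf, if_neg h1, if_neg h2, if_neg h3, if_neg h4, if_pos h5]
    decide
  by_cases h6 : (PySem.Str.startswith k "property_" || PySem.Str.startswith k "building_roof_") = true
  · have hf : pvFirstFront pvRules k = ["properties"] := by
      simp only [pvRules, pvFirstFront]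
      rw [if_neg h1, if_neg h2, if_neg h3, if_neg h4, if_neg h5, if_pos h6]
    rw [hf, if_neg h1, if_neg h2, if_neg h3, if_neg h4, if_neg h5, if_pos h6]
    decide
  by_cases h7 : (k == "projectile") = true
  · have hf : pvFirstFront pvRules k = ["projectiles"] := by
      simp only [pvRules, pvFirstFront]
      rw [if_neg h1, if_neg h2, if_neg h3, if_neg h4, if_neg h5, if_neg h6, if_pos h7]
    rw [hf, if_neg h1, if_neg h2, if_neg h3, if_neg h4, if_neg h5, if_neg h6, if_pos h7]
    decide
  by_cases h8 : (PySem.Str.startswith k "ui_") = true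
  · have hf : pvFirstFront pvRules k = ["ui_markers"] := by
      simp only [pvRules, pvFirstFront]
      rw [if_neg h1, if_neg h2, if_neg h3, if_neg h4, if_neg h5, if_neg h6, if_neg h7, if_pos h8]
    rw [hf, if_neg h1, if_neg h2, if_neg h3, if_neg h4, if_neg h5, if_neg h6, if_neg h7, if_pos h8]
    decide
  by_cases h9 : (k == "transit") = true
  · have hf : pvFirstFront pvRules k = ["features", "terrain"] := by
      simp only [pvRules, pvFirstFront]
      rw [if_neg h1, if_neg h2, if_neg h3, if_neg h4, if_neg h5, if_neg h6, if_neg h7, if_neg h8, if_pos h9]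
    rw [hf, if_neg h1, if_neg h2, if_neg h3, if_neg h4, if_neg h5, if_neg h6, if_neg h7, if_neg h8, if_pos h9]
    decide
  have hf : pvFirstFront pvRules k = [] := by
    simp only [pvRules, pvFirstFront]
    rw [if_neg h1, if_neg h2, if_neg h3, if_neg h4, if_neg h5, if_neg h6, if_neg h7, if_neg h8, if_neg h9]
  rw [hf, if_neg h1, if_neg h2, if_neg h3, if_neg h4, if_neg h5, if_neg h6, if_neg h7, if_neg h8, if_neg h9]
  decide

-- ===== VERDICT (by name: the statement is the Claim_ definition above) =====
theorem category_order_for_color_spec : Claim_equal_category_order_for_color := by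
  intro ck _
  unfold Spec_category_order_for_color category_order_for_color category_order_for_color_alt
  exact pv_core (pvNormKey ck)
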